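-- pv_equiv track=rewrite | github.com/pc5401/my_BOJ | 백준/Gold/2436. 공약수/공약수.py | solve
-- ===== SOURCE A (Python) =====
-- from math import gcd, isqrt
--
-- def solve(G, L):
--     if L % G != 0:
--         return None
--     n = L // G
--     best_sum = None
--     best_pair = None
--
--     r = isqrt(n)
--     for d in range(1, r + 1):
--         if n % d != 0:
--             continue
--         e = n // d
--         if gcd(d, e) != 1:
--             continue
--         a, b = G * d, G * e
--         s = a + b
--         if best_sum is None or s < best_sum:
--             best_sum = s
--             best_pair = (min(a, b), max(a, b))
--     return best_pair
-- ===== SOURCE B (Python) =====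
-- from math import gcd, isqrt
--
-- def solve(G, L):
--     if L % G != 0:
--         return None
--     n = L // G
--     for d in range(isqrt(n), 0, -1):
--         if n % d == 0 and gcd(d, n // d) == 1:
--             return (G * d, G * (n // d))
--     return None
-- ===== Notes on version B (the rewrite author's own statement) =====
-- stated objective: simpler
-- what changed: Replaces the best_sum/best_pair minimum-tracking accumulator with an early-return scan from isqrt(n) downward: the first coprime divisor pair found is the closest to sqrt(n) and hence minimizes the sum, so no state is kept; Pre_ only excludes inputs where A raises (G=0, or G|L with L//G<0 where isqrt raises).
-- intended difference: On negative G with G|L and L//G>1 the negative sums invert A's minimization so A returns the extreme pair (G*n, G); B returns G times the coprime divisor pair closest to sqrt(n) in (G*d, G*e) order, which is the pair the function is meant to find (negative gcd is an unspecified corner of the BOJ problem). — e.g. on solve(-2, -12): A returns some (-12, -2), B returns some (-4, -6)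
import Mathlib
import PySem

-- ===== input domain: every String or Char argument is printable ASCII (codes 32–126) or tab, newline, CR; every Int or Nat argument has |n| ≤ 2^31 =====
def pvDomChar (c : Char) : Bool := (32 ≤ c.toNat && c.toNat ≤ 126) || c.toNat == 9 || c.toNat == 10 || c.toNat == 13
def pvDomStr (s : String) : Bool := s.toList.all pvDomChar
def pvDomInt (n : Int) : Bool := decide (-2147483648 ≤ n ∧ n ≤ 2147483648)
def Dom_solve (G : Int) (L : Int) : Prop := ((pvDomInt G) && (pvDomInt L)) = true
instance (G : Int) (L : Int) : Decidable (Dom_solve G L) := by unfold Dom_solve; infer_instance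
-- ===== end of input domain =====

-- B replaces A's best_sum/best_pair accumulator by an early-return downward scan from isqrt(n);
-- on negative G (an unspecified corner) the two choose different pairs, stated in D_solve below.

-- ===== PORT A =====
-- one iteration of A's for-loop; state = (best_sum, best_pair)
def solveStep (G n : Int) (st : Option Int × Option (Int × Int)) (d : Int) :
    Option Int × Option (Int × Int) :=
  if PySem.Int.mod n d ≠ 0 then st
  else
    let e := PySem.Int.floordiv n d
    if Int.gcd d e ≠ 1 then st
    else
      let a := G * d
      let b := G * e
      let s := a + b
      match st.1 with
      | none => (some s, some (min a b, max a b))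
      | some bs => if s < bs then (some s, some (min a b, max a b)) else st

-- math.isqrt is ported as Nat.sqrt ∘ Int.toNat: exact on the nonnegative arguments Pre_ admits
def solve (G : Int) (L : Int) : Option (Int × Int) :=
  if PySem.Int.mod L G ≠ 0 then none
  else
    let n := PySem.Int.floordiv L G
    let r : Int := (Nat.sqrt n.toNat : Int)
    ((PySem.List.pyRange 1 (r + 1) 1).foldl (solveStep G n) (none, none)).2

-- ===== PORT B =====
-- B's for-loop over range(isqrt(n), 0, -1): tries d = k, k-1, …, 1, returns at the first hit
def findDown (G n : Int) : Nat → Option (Int × Int)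
  | 0 => none
  | Nat.succ k =>
    let d : Int := ((k + 1 : Nat) : Int)
    if PySem.Int.mod n d = 0 ∧ Int.gcd d (PySem.Int.floordiv n d) = 1 then
      some (G * d, G * PySem.Int.floordiv n d)
    else findDown G n k

def solve_alt (G : Int) (L : Int) : Option (Int × Int) :=
  if PySem.Int.mod L G ≠ 0 then none
  else
    let n := PySem.Int.floordiv L G
    findDown G n (Nat.sqrt n.toNat)

-- ===== PRECONDITION & SPEC =====
-- Pre_ excludes exactly the inputs on which A raises: G = 0 (ZeroDivisionError in L % G)
-- and G ∣ L with L // G < 0 (ValueError in isqrt of a negative number).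
def Pre_solve (G : Int) (L : Int) : Prop :=
  G ≠ 0 ∧ (PySem.Int.mod L G ≠ 0 ∨ 0 ≤ PySem.Int.floordiv L G)
instance (G : Int) (L : Int) : Decidable (Pre_solve G L) := by unfold Pre_solve; infer_instance

def pvWitness_solve : Int × Int := (2, 12)

-- On negative G with G ∣ L and L // G > 1 the negative sums invert A's minimization, so A
-- returns the extreme pair (G*n, G); B returns G times the coprime divisor pair closest to
-- √n in (G*d, G*e) order — the pair the function is meant to find (negative gcd is an
-- unspecified corner of the BOJ problem).
def D_solve (G : Int) (L : Int) : Prop :=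
  G < 0 ∧ PySem.Int.mod L G = 0 ∧ 1 < PySem.Int.floordiv L G
instance (G : Int) (L : Int) : Decidable (D_solve G L) := by unfold D_solve; infer_instance

def Spec_solve (G : Int) (L : Int) (out : Option (Int × Int)) : Prop :=
  ¬ D_solve G L → out = solve_alt G L
instance (G : Int) (L : Int) (out : Option (Int × Int)) : Decidable (Spec_solve G L out) := by
  unfold Spec_solve; infer_instance

def pvDiffWitness_solve : Int × Int := (-2, -12)
def pvDiffWitnessOut_solve : (Option (Int × Int)) × (Option (Int × Int)) :=
  (some (-12, -2), some (-4, -6))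

-- ===== CLAIM (what is proved, stated in full; the proofs are below) =====
def Claim_unchanged_solve : Prop :=
  ∀ (G : Int) (L : Int), Dom_solve G L → Pre_solve G L → Spec_solve G L (solve G L)
def Claim_changed_solve : Prop :=
  Dom_solve (pvDiffWitness_solve.1) (pvDiffWitness_solve.2) ∧
  Pre_solve (pvDiffWitness_solve.1) (pvDiffWitness_solve.2) ∧
  D_solve (pvDiffWitness_solve.1) (pvDiffWitness_solve.2) ∧
  solve (pvDiffWitness_solve.1) (pvDiffWitness_solve.2) = pvDiffWitnessOut_solve.1 ∧
  solve_alt (pvDiffWitness_solve.1) (pvDiffWitness_solve.2) = pvDiffWitnessOut_solve.2 ∧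
  pvDiffWitnessOut_solve.1 ≠ pvDiffWitnessOut_solve.2
def Claim_exact_solve : Prop :=
  ∀ (G : Int) (L : Int), Dom_solve G L → Pre_solve G L → D_solve G L →
    solve G L ≠ solve_alt G L

-- ===== LEMMAS AND PROOFS =====

-- A's state as a function of B's early-return result
def encode (o : Option (Int × Int)) : Option Int × Option (Int × Int) :=
  match o with
  | none => (none, none)
  | some (a, b) => (some (a + b), some (a, b))

@[simp] lemma encode_snd (o : Option (Int × Int)) : (encode o).2 = o := by
  cases o with
  | none => rfl
  | some p => cases p; rfl

lemma findDown_succ (G n : Int) (k : Nat) :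
    findDown G n (k + 1) =
      (if PySem.Int.mod n ((k + 1 : Nat) : Int) = 0 ∧
          Int.gcd ((k + 1 : Nat) : Int) (PySem.Int.floordiv n ((k + 1 : Nat) : Int)) = 1 then
        some (G * ((k + 1 : Nat) : Int), G * PySem.Int.floordiv n ((k + 1 : Nat) : Int))
      else findDown G n k) := rfl

-- A's loop state after processing d = 1, …, k
def Astate (G n : Int) (k : Nat) : Option Int × Option (Int × Int) :=
  (PySem.List.pyRange 1 ((k : Int) + 1) 1).foldl (solveStep G n) (none, none)

lemma Astate_zero (G n : Int) : Astate G n 0 = (none, none) := by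
  unfold Astate
  rw [PySem.List.pyRange_one_eq_nil (by norm_num)]
  rfl

lemma Astate_succ (G n : Int) (k : Nat) :
    Astate G n (k + 1) = solveStep G n (Astate G n k) ((k : Int) + 1) := by
  unfold Astate
  have h : ((k + 1 : Nat) : Int) + 1 = ((k : Int) + 1) + 1 := by push_cast; ring
  rw [h, PySem.List.pyRange_one_succ_right (by omega), List.foldl_append]
  rfl

-- the key arithmetic: among divisor pairs, d + m/d strictly decreases as d grows below √m
lemma sum_div_lt (m d d' : Nat) (hd' : d' ∣ m) (hd : d ∣ m) (h0 : 0 < d')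
    (hlt : d' < d) (hsq : d * d ≤ m) : d + m / d < d' + m / d' := by
  obtain ⟨e, he⟩ := hd
  obtain ⟨e', he'⟩ := hd'
  have hdpos : 0 < d := lt_trans h0 hlt
  have hde : m / d = e := by rw [he, Nat.mul_div_cancel_left _ hdpos]
  have hde' : m / d' = e' := by rw [he', Nat.mul_div_cancel_left _ h0]
  rw [hde, hde']
  have hdle : d ≤ e := by
    have : d * d ≤ d * e := by rw [← he]; exact hsq
    exact Nat.le_of_mul_le_mul_left this hdpos
  have heq : (d' : Int) * e' = (d : Int) * e := by
    have : (d' * e' : Nat) = (d * e : Nat) := by rw [← he', ← he]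
    exact_mod_cast this
  have h1 : (0 : Int) < (d : Int) - d' := by
    have : (d' : Int) < d := by exact_mod_cast hlt
    omega
  have h2 : (0 : Int) < (e : Int) - d' := by
    have : (d' : Int) < e := by
      have : d' < e := lt_of_lt_of_le hlt hdle
      exact_mod_cast this
    omega
  have key : (d' : Int) * ((d' + e') - (d + e)) = ((d : Int) - d') * ((e : Int) - d') + ((d' : Int) * e' - (d : Int) * e) := by ring
  have hpos : (0 : Int) < ((d : Int) - d') * ((e : Int) - d') := mul_pos h1 h2
  have hd'pos : (0 : Int) < d' := by exact_mod_cast h0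
  have : (0 : Int) < (d' : Int) * (((d' : Int) + e') - ((d : Int) + e)) := by
    rw [key, heq]; simpa using hpos
  have hfin : ((d : Int) + e) < ((d' : Int) + e') := by nlinarith
  exact_mod_cast hfin

-- every value findDown returns is the pair of some divisor d' ≤ k
lemma findDown_char (G : Int) (m : Nat) (k : Nat) :
    findDown G (m : Int) k = none ∨
    ∃ d' : Nat, 0 < d' ∧ d' ≤ k ∧ d' ∣ m ∧
      findDown G (m : Int) k = some (G * (d' : Int), G * ((m / d' : Nat) : Int)) := by
  induction k with
  | zero => exact Or.inl rfl
  | succ k ih =>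
    by_cases h : PySem.Int.mod (m : Int) ((k + 1 : Nat) : Int) = 0 ∧
        Int.gcd ((k + 1 : Nat) : Int) (PySem.Int.floordiv (m : Int) ((k + 1 : Nat) : Int)) = 1
    · right
      refine ⟨k + 1, Nat.succ_pos k, le_refl _, ?_, ?_⟩
      · have := h.1
        rw [PySem.Int.mod_natCast] at this
        exact Nat.dvd_of_mod_eq_zero (by exact_mod_cast this)
      · rw [findDown_succ, if_pos h, PySem.Int.floordiv_natCast]
    · have hstep : findDown G (m : Int) (k + 1) = findDown G (m : Int) k := by
        rw [findDown_succ, if_neg h]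
      rcases ih with h0 | ⟨d', hp, hle, hdvd, heq⟩
      · exact Or.inl (hstep.trans h0)
      · exact Or.inr ⟨d', hp, Nat.le_succ_of_le hle, hdvd, hstep.trans heq⟩

-- findDown always hits (at d = 1) once k ≥ 1
lemma findDown_ne_none (G : Int) (m : Nat) (k : Nat) (hk : 1 ≤ k) :
    findDown G (m : Int) k ≠ none := by
  induction k with
  | zero => omega
  | succ k ih =>
    rw [findDown_succ]
    by_cases h : PySem.Int.mod (m : Int) ((k + 1 : Nat) : Int) = 0 ∧
        Int.gcd ((k + 1 : Nat) : Int) (PySem.Int.floordiv (m : Int) ((k + 1 : Nat) : Int)) = 1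
    · rw [if_pos h]; simp
    · rw [if_neg h]
      by_cases hk1 : 1 ≤ k
      · exact ih hk1
      · exfalso
        have hk0 : k = 0 := by omega
        subst hk0
        apply h
        constructor
        · rw [PySem.Int.mod_natCast]; simp
        · rw [PySem.Int.floordiv_natCast]; simp

-- invariant for G > 0: A's state is the encoding of B's downward-scan result
lemma Astate_pos (G : Int) (hG : 0 < G) (m : Nat) (k : Nat) (hk : k ≤ Nat.sqrt m) :
    Astate G (m : Int) k = encode (findDown G (m : Int) k) := by
  induction k with
  | zero => rw [Astate_zero]; rfl
  | succ k ih =>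
    have hk' : k ≤ Nat.sqrt m := Nat.le_of_succ_le hk
    have hsq : (k + 1) * (k + 1) ≤ m := Nat.le_sqrt.mp hk
    rw [Astate_succ, ih hk']
    have hcast : ((k : Int) + 1) = ((k + 1 : Nat) : Int) := by push_cast; ring
    rw [hcast]
    by_cases hdvd : (k + 1) ∣ m
    · have hmod : PySem.Int.mod (m : Int) ((k + 1 : Nat) : Int) = 0 := by
        rw [PySem.Int.mod_natCast, Nat.mod_eq_zero_of_dvd hdvd]; rfl
      by_cases hgcd : Nat.gcd (k + 1) (m / (k + 1)) = 1
      · -- a hit: both sides take the new pair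
        have hgcdI : Int.gcd ((k + 1 : Nat) : Int) (PySem.Int.floordiv (m : Int) ((k + 1 : Nat) : Int)) = 1 := by
          rw [PySem.Int.floordiv_natCast, Int.gcd_natCast_natCast]; exact hgcd
        have hgcdI2 : Int.gcd ((k + 1 : Nat) : Int) (((m / (k + 1) : Nat)) : Int) = 1 := by
          rw [Int.gcd_natCast_natCast]; exact hgcd
        have hB : findDown G (m : Int) (k + 1) =
            some (G * ((k + 1 : Nat) : Int), G * ((m / (k + 1) : Nat) : Int)) := by
          rw [findDown_succ, if_pos ⟨hmod, hgcdI⟩, PySem.Int.floordiv_natCast]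
        rw [hB]
        have hdle : (k + 1) ≤ m / (k + 1) := (Nat.le_div_iff_mul_le (Nat.succ_pos k)).mpr hsq
        have hab : G * ((k + 1 : Nat) : Int) ≤ G * ((m / (k + 1) : Nat) : Int) := by
          have : ((k + 1 : Nat) : Int) ≤ ((m / (k + 1) : Nat) : Int) := by exact_mod_cast hdle
          exact mul_le_mul_of_nonneg_left this hG.le
        unfold solveStep
        rw [if_neg (not_not_intro hmod), PySem.Int.floordiv_natCast,
            if_neg (not_not_intro hgcdI2)]
        rcases findDown_char G m k with h0 | ⟨d', hp, hle, hdvd', heq⟩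
        · rw [h0]
          simp only [encode]
          rw [min_eq_left hab, max_eq_right hab]
        · rw [heq]
          simp only [encode]
          have hlt : (k + 1) + m / (k + 1) < d' + m / d' :=
            sum_div_lt m (k + 1) d' hdvd' hdvd hp (Nat.lt_succ_of_le hle) hsq
          have hs : G * ((k + 1 : Nat) : Int) + G * ((m / (k + 1) : Nat) : Int) <
              G * (d' : Int) + G * ((m / d' : Nat) : Int) := by
            have h1 : ((k + 1 : Nat) : Int) + ((m / (k + 1) : Nat) : Int) <
                (d' : Int) + ((m / d' : Nat) : Int) := by exact_mod_cast hlt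
            calc G * ((k + 1 : Nat) : Int) + G * ((m / (k + 1) : Nat) : Int)
                = G * (((k + 1 : Nat) : Int) + ((m / (k + 1) : Nat) : Int)) := by ring
              _ < G * ((d' : Int) + ((m / d' : Nat) : Int)) := by
                  exact mul_lt_mul_of_pos_left h1 hG
              _ = G * (d' : Int) + G * ((m / d' : Nat) : Int) := by ring
          rw [if_pos hs, min_eq_left hab, max_eq_right hab]
      · -- gcd misses: both sides unchanged
        have hB : findDown G (m : Int) (k + 1) = findDown G (m : Int) k := by
          rw [findDown_succ, if_neg (by
            rintro ⟨-, hg⟩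
            rw [PySem.Int.floordiv_natCast, Int.gcd_natCast_natCast] at hg
            exact hgcd hg)]
        rw [hB]
        unfold solveStep
        rw [if_neg (not_not_intro hmod), PySem.Int.floordiv_natCast,
            if_pos (by rw [Int.gcd_natCast_natCast]; exact hgcd)]
    · -- not a divisor: both sides unchanged
      have hmod : PySem.Int.mod (m : Int) ((k + 1 : Nat) : Int) ≠ 0 := by
        rw [PySem.Int.mod_natCast]
        intro h
        exact hdvd (Nat.dvd_of_mod_eq_zero (by exact_mod_cast h))
      have hB : findDown G (m : Int) (k + 1) = findDown G (m : Int) k := by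
        rw [findDown_succ, if_neg (by rintro ⟨hm', -⟩; exact hmod hm')]
      rw [hB]
      unfold solveStep
      rw [if_pos hmod]

-- invariant for G < 0: A's first hit is d = 1 and it is never replaced
lemma Astate_neg (G : Int) (hG : G < 0) (m : Nat) (k : Nat) (h1 : 1 ≤ k)
    (hk : k ≤ Nat.sqrt m) :
    Astate G (m : Int) k = (some (G + G * (m : Int)), some (G * (m : Int), G)) := by
  have hm1 : 1 ≤ m := by
    have : 0 < Nat.sqrt m := lt_of_lt_of_le h1 hk
    exact Nat.sqrt_pos.mp this
  have hGm : G * (m : Int) ≤ G * 1 := by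
    apply mul_le_mul_of_nonpos_left _ hG.le
    exact_mod_cast hm1
  induction k with
  | zero => omega
  | succ k ih =>
    by_cases hk1 : 1 ≤ k
    · -- step: d = k + 1 ≥ 2, never an improvement for G < 0
      have hk' : k ≤ Nat.sqrt m := Nat.le_of_succ_le hk
      have hsq : (k + 1) * (k + 1) ≤ m := Nat.le_sqrt.mp hk
      rw [Astate_succ, ih hk1 hk']
      have hcast : ((k : Int) + 1) = ((k + 1 : Nat) : Int) := by push_cast; ring
      rw [hcast]
      unfold solveStep
      by_cases hdvd : (k + 1) ∣ m
      · have hmodN : m % (k + 1) = 0 := Nat.mod_eq_zero_of_dvd hdvd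
        have hmod : PySem.Int.mod (m : Int) ((k + 1 : Nat) : Int) = 0 := by
          rw [PySem.Int.mod_natCast, hmodN]; rfl
        rw [if_neg (not_not_intro hmod), PySem.Int.floordiv_natCast]
        by_cases hgcd : Nat.gcd (k + 1) (m / (k + 1)) = 1
        · rw [if_neg (not_not_intro (by rw [Int.gcd_natCast_natCast]; exact hgcd))]
          have hlt : (k + 1) + m / (k + 1) < 1 + m := by
            have := sum_div_lt m (k + 1) 1 (one_dvd m) hdvd Nat.one_pos
              (by omega) hsq
            simpa [Nat.div_one] using this
          have hns : ¬ (G * ((k + 1 : Nat) : Int) + G * ((m / (k + 1) : Nat) : Int) <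
              G + G * (m : Int)) := by
            have h1' : ((k + 1 : Nat) : Int) + ((m / (k + 1) : Nat) : Int) <
                1 + (m : Int) := by exact_mod_cast hlt
            have : G * (1 + (m : Int)) <
                G * (((k + 1 : Nat) : Int) + ((m / (k + 1) : Nat) : Int)) :=
              mul_lt_mul_of_neg_left h1' hG
            push_neg
            nlinarith
          simp only [if_neg hns]
        · rw [if_pos (by rw [Int.gcd_natCast_natCast]; exact hgcd)]
      · have hmod : PySem.Int.mod (m : Int) ((k + 1 : Nat) : Int) ≠ 0 := by
          rw [PySem.Int.mod_natCast]
          intro h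
          exact hdvd (Nat.dvd_of_mod_eq_zero (by exact_mod_cast h))
        rw [if_pos hmod]
    · -- base: k = 0, the first iteration d = 1 always hits
      have hk0 : k = 0 := by omega
      subst hk0
      rw [Astate_succ, Astate_zero]
      unfold solveStep
      simp only [Nat.cast_zero]
      have hmod : PySem.Int.mod (m : Int) ((0 : Int) + 1) = 0 := by
        have : ((0 : Int) + 1) = ((1 : Nat) : Int) := by norm_num
        rw [this, PySem.Int.mod_natCast]
        simp
      rw [if_neg (not_not_intro hmod)]
      have hfd : PySem.Int.floordiv (m : Int) ((0 : Int) + 1) = (m : Int) := by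
        have : ((0 : Int) + 1) = ((1 : Nat) : Int) := by norm_num
        rw [this, PySem.Int.floordiv_natCast]
        simp
      rw [hfd]
      rw [if_neg (by simp)]
      have hmin : min (G * ((0 : Int) + 1)) (G * (m : Int)) = G * (m : Int) := by
        rw [min_eq_right]; simpa using hGm
      have hmax : max (G * ((0 : Int) + 1)) (G * (m : Int)) = G := by
        rw [max_eq_left (by simpa using hGm)]; ring
      simp only [hmin, hmax]
      norm_num

-- ===== VERDICT (by name: the statement is the Claim_ definition above) =====
theorem solve_spec : Claim_unchanged_solve := by
  intro G L _ hPre hnD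
  obtain ⟨hG, hPre2⟩ := hPre
  unfold solve solve_alt
  by_cases hmod : PySem.Int.mod L G ≠ 0
  · rw [if_pos hmod, if_pos hmod]
  · push_neg at hmod
    rw [if_neg (by simpa using hmod), if_neg (by simpa using hmod)]
    have hn : 0 ≤ PySem.Int.floordiv L G := by
      rcases hPre2 with h | h
      · exact absurd hmod h
      · exact h
    set n := PySem.Int.floordiv L G with hndef
    obtain ⟨m, hm⟩ : ∃ m : Nat, n = (m : Int) := ⟨n.toNat, (Int.toNat_of_nonneg hn).symm⟩
    have htn : n.toNat = m := by rw [hm]; exact Int.toNat_natCast m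
    rcases lt_trichotomy G 0 with hneg | h0 | hpos
    · -- G < 0: ¬ D_ forces n ≤ 1, i.e. m = 0 or m = 1; compute both sides
      have hle : n ≤ 1 := by
        by_contra habs
        exact hnD ⟨hneg, hmod, by omega⟩
      have hm1 : m ≤ 1 := by
        have : (m : Int) ≤ 1 := hm ▸ hle
        exact_mod_cast this
      interval_cases m
      · show (Astate G n (Nat.sqrt n.toNat)).2 = findDown G n (Nat.sqrt n.toNat)
        rw [htn]
        show (Astate G n (Nat.sqrt 0)).2 = findDown G n (Nat.sqrt 0)
        rw [show Nat.sqrt 0 = 0 from rfl, Astate_zero]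
        rfl
      · show (Astate G n (Nat.sqrt n.toNat)).2 = findDown G n (Nat.sqrt n.toNat)
        rw [htn, hm]
        rw [show Nat.sqrt 1 = 1 from rfl]
        rw [show (1 : Nat) = 0 + 1 from rfl, Astate_succ, Astate_zero]
        unfold solveStep
        rw [findDown_succ]
        norm_num [PySem.Int.mod, PySem.Int.floordiv]
    · exact absurd h0 hG
    · show (Astate G n (Nat.sqrt n.toNat)).2 = findDown G n (Nat.sqrt n.toNat)
      rw [htn, hm, Astate_pos G hpos m (Nat.sqrt m) (le_refl _), encode_snd]

theorem solve_changed : Claim_changed_solve := by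
  unfold Claim_changed_solve
  refine ⟨by decide, by decide, by decide, ?_, ?_, by decide⟩
  · show solve (-2) (-12) = some (-12, -2)
    unfold solve
    rw [if_neg (by decide)]
    show ((PySem.List.pyRange 1 (((PySem.Int.floordiv (-12 : Int) (-2 : Int)).toNat.sqrt : Int) + 1) 1).foldl
        (solveStep (-2) (PySem.Int.floordiv (-12) (-2))) (none, none)).2 = some (-12, -2)
    rw [show (PySem.Int.floordiv (-12 : Int) (-2 : Int)).toNat.sqrt = 2 from by
      rw [show PySem.Int.floordiv (-12 : Int) (-2 : Int) = 6 from by decide]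
      rw [show Int.toNat (6 : Int) = 6 from rfl]
      norm_num]
    decide
  · show solve_alt (-2) (-12) = some (-4, -6)
    unfold solve_alt
    rw [if_neg (by decide)]
    show findDown (-2) (PySem.Int.floordiv (-12) (-2))
        (PySem.Int.floordiv (-12 : Int) (-2 : Int)).toNat.sqrt = some (-4, -6)
    rw [show (PySem.Int.floordiv (-12 : Int) (-2 : Int)).toNat.sqrt = 2 from by
      rw [show PySem.Int.floordiv (-12 : Int) (-2 : Int) = 6 from by decide]
      rw [show Int.toNat (6 : Int) = 6 from rfl]
      norm_num]
    decide

theorem solve_tight : Claim_exact_solve := by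
  intro G L _ hPre hD
  obtain ⟨hGneg, hmod, hn1⟩ := hD
  obtain ⟨hG, -⟩ := hPre
  unfold solve solve_alt
  rw [if_neg (by simpa using hmod), if_neg (by simpa using hmod)]
  set n := PySem.Int.floordiv L G with hndef
  have hn : 0 ≤ n := by omega
  obtain ⟨m, hm⟩ : ∃ m : Nat, n = (m : Int) := ⟨n.toNat, (Int.toNat_of_nonneg hn).symm⟩
  have htn : n.toNat = m := by rw [hm]; exact Int.toNat_natCast m
  have hm2 : 2 ≤ m := by
    have : (1 : Int) < (m : Int) := hm ▸ hn1
    exact_mod_cast this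
  have hs1 : 1 ≤ Nat.sqrt m := Nat.sqrt_pos.mpr (by omega)
  have hslt : Nat.sqrt m < m := Nat.sqrt_lt_self (by omega)
  show (Astate G n (Nat.sqrt n.toNat)).2 ≠ findDown G n (Nat.sqrt n.toNat)
  rw [htn, hm, Astate_neg G hGneg m (Nat.sqrt m) hs1 (le_refl _)]
  rcases findDown_char G m (Nat.sqrt m) with h0 | ⟨d', hp, hle, -, heq⟩
  · exact absurd h0 (findDown_ne_none G m (Nat.sqrt m) hs1)
  · rw [heq]
    intro habs
    have h1 : G * (m : Int) = G * (d' : Int) := by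
      have := Option.some.inj habs
      exact congrArg Prod.fst this
    have hdm : (m : Int) = (d' : Int) := mul_left_cancel₀ hG h1
    have : m = d' := by exact_mod_cast hdm
    omega
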